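-- pv_equiv track=rewrite | github.com/MaitryG/DSA_Algorithms | alphabetical.py | solution
-- ===== SOURCE A (Python) =====
-- def solution(matrix):
--     n = len(matrix)
--     m = len(matrix[0])
--
--     # Initialize matrices to track the arm lengths for each diagonal
--     top_left = [[0] * m for _ in range(n)]
--     top_right = [[0] * m for _ in range(n)]
--     bottom_left = [[0] * m for _ in range(n)]
--     bottom_right = [[0] * m for _ in range(n)]
--
--     # Fill top_left and top_right matrices
--     for i in range(n):
--         for j in range(m):
--             if i > 0 and j > 0 and matrix[i][j] == matrix[i - 1][j - 1]:
--                 top_left[i][j] = 1 + top_left[i - 1][j - 1]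
--             if i > 0 and j < m - 1 and matrix[i][j] == matrix[i - 1][j + 1]:
--                 top_right[i][j] = 1 + top_right[i - 1][j + 1]
--
--     # Fill bottom_left and bottom_right matrices
--     for i in range(n - 1, -1, -1):
--         for j in range(m):
--             if i < n - 1 and j > 0 and matrix[i][j] == matrix[i + 1][j - 1]:
--                 bottom_left[i][j] = 1 + bottom_left[i + 1][j - 1]
--             if i < n - 1 and j < m - 1 and matrix[i][j] == matrix[i + 1][j + 1]:
--                 bottom_right[i][j] = 1 + bottom_right[i + 1][j + 1]
--
--     max_size = 0
--     best_center = None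
--
--     # Now find the largest X-shape
--     for i in range(n):
--         for j in range(m):
--             # Find the minimum arm length for this cell (center of the X-shape)
--             size = min(top_left[i][j], top_right[i][j], bottom_left[i][j], bottom_right[i][j])
--             if size > max_size:
--                 max_size = size
--                 best_center = [i, j]
--             elif size == max_size:
--                 # Tie-breaking for minimal row, then column
--                 if best_center is None or i < best_center[0] or (i == best_center[0] and j < best_center[1]):
--                     best_center = [i, j]
--
--     return best_center if best_center else [-1, -1]
-- ===== SOURCE B (Python) =====
-- def solution(matrix):
--     n = len(matrix)
--     m = len(matrix[0])
--     if m == 0: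
--         return [-1, -1]
--
--     def arm(i, j, di, dj):
--         c = matrix[i][j]
--         k = 0
--         while 0 <= i + di <= n - 1 and 0 <= j + dj <= m - 1 and matrix[i + di][j + dj] == c:
--             i += di
--             j += dj
--             k += 1
--         return k
--
--     max_size = 0
--     best = [0, 0]
--     for i in range(n):
--         for j in range(m):
--             size = min(min(min(arm(i, j, -1, -1), arm(i, j, -1, 1)), arm(i, j, 1, -1)), arm(i, j, 1, 1))
--             if size > max_size:
--                 max_size = size
--                 best = [i, j]
--     return best
-- ===== Notes on version B (the rewrite author's own statement) =====
-- stated objective: simpler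
-- what changed: Replaced A's four dynamic-programming arm tables (two extra passes over the grid plus a final scan) by a single scan that expands the four diagonal arms outward from each cell on the fly, comparing against the centre value; the best-so-far update keeps only the strictly-greater case because A's elif tie-break can never fire after the first cell of a row-major scan.
-- outside the precondition, e.g. on solution([]): A raises IndexError, B raises IndexError; on solution([[1, 1], [1]]): A raises IndexError, B raises IndexError; on solution([[7], [-2, 2, 4], [], [4, 0]]): A returns [0, 0], B raises IndexError
import Mathlib
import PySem

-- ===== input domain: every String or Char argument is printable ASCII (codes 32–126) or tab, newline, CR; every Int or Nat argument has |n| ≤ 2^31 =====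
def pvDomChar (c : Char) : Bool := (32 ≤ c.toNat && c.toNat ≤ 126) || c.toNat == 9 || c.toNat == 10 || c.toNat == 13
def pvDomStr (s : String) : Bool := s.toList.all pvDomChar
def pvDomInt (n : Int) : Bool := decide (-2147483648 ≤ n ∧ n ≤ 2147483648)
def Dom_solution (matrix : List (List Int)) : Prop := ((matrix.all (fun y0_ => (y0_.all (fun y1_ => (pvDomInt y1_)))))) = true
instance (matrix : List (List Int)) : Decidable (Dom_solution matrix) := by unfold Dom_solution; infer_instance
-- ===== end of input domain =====

-- B replaces A's four DP tables and extra pass by a direct per-cell outward expansion of the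
-- four diagonal arms (objective: simpler; return value only, neither version mutates its input).

-- ===== PORT A =====
-- matrix[i][j] for indices that are in range whenever Pre_solution holds (Python raises outside Pre_)
def pvGet (M : List (List Int)) (i j : Nat) : Int := (M.getD i []).getD j 0

-- 'table[i][j] = v' on a 2D array represented as a function of the two indices
def pvUpd (t : Nat → Nat → Int) (i j : Nat) (v : Int) : Nat → Nat → Int :=
  fun a b => if a = i ∧ b = j then v else t a b

-- body of A's first fill loop, for one cell (i, j): the pair is (top_left, top_right)
def pvStepTop (M : List (List Int)) (m i : Nat)
    (q : (Nat → Nat → Int) × (Nat → Nat → Int)) (j : Nat) :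
    (Nat → Nat → Int) × (Nat → Nat → Int) :=
  let q1 := if 0 < i ∧ 0 < j ∧ pvGet M i j = pvGet M (i-1) (j-1)
            then (pvUpd q.1 i j (1 + q.1 (i-1) (j-1)), q.2) else q
  if 0 < i ∧ j < m - 1 ∧ pvGet M i j = pvGet M (i-1) (j+1)
  then (q1.1, pvUpd q1.2 i j (1 + q1.2 (i-1) (j+1))) else q1

def pvRowTop (M : List (List Int)) (m : Nat)
    (p : (Nat → Nat → Int) × (Nat → Nat → Int)) (i : Nat) :
    (Nat → Nat → Int) × (Nat → Nat → Int) :=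
  (List.range m).foldl (pvStepTop M m i) p

-- body of A's second fill loop, for one cell (i, j): the pair is (bottom_left, bottom_right)
def pvStepBot (M : List (List Int)) (n m i : Nat)
    (q : (Nat → Nat → Int) × (Nat → Nat → Int)) (j : Nat) :
    (Nat → Nat → Int) × (Nat → Nat → Int) :=
  let q1 := if i < n - 1 ∧ 0 < j ∧ pvGet M i j = pvGet M (i+1) (j-1)
            then (pvUpd q.1 i j (1 + q.1 (i+1) (j-1)), q.2) else q
  if i < n - 1 ∧ j < m - 1 ∧ pvGet M i j = pvGet M (i+1) (j+1)
  then (q1.1, pvUpd q1.2 i j (1 + q1.2 (i+1) (j+1))) else q1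

def pvRowBot (M : List (List Int)) (n m : Nat)
    (p : (Nat → Nat → Int) × (Nat → Nat → Int)) (i : Nat) :
    (Nat → Nat → Int) × (Nat → Nat → Int) :=
  (List.range m).foldl (pvStepBot M n m i) p

-- body of A's final scan, for one cell (i, j); state = (max_size, best_center)
def pvStepScanA (sz : Nat → Nat → Int) (i : Nat)
    (s : Int × Option (List Int)) (j : Nat) : Int × Option (List Int) :=
  let size := sz i j
  if size > s.1 then (size, some [(i : Int), (j : Int)])
  else if size = s.1 then
    match s.2 with
    | none => (s.1, some [(i : Int), (j : Int)])
    | some b => if (i : Int) < b.getD 0 0 ∨ ((i : Int) = b.getD 0 0 ∧ (j : Int) < b.getD 1 0)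
                then (s.1, some [(i : Int), (j : Int)]) else s
  else s

def pvRowScanA (sz : Nat → Nat → Int) (m : Nat)
    (s : Int × Option (List Int)) (i : Nat) : Int × Option (List Int) :=
  (List.range m).foldl (pvStepScanA sz i) s

def solution (matrix : List (List Int)) : List Int :=
  let n := matrix.length
  let m := (matrix.headD []).length
  -- for i in range(n): for j in range(m): fill top_left/top_right
  let tltr := (List.range n).foldl (pvRowTop matrix m) (fun _ _ => 0, fun _ _ => 0)
  -- for i in range(n-1, -1, -1) (= reversed(range(n))): fill bottom_left/bottom_right
  let blbr := ((List.range n).reverse).foldl (pvRowBot matrix n m) (fun _ _ => 0, fun _ _ => 0)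
  -- min(top_left[i][j], top_right[i][j], bottom_left[i][j], bottom_right[i][j]), left-nested like Python's min
  let sz := fun i j => min (min (min (tltr.1 i j) (tltr.2 i j)) (blbr.1 i j)) (blbr.2 i j)
  let fin := (List.range n).foldl (pvRowScanA sz m) ((0 : Int), none)
  match fin.2 with
  | some b => b
  | none => [-1, -1]

-- ===== PORT B =====
-- matrix[i][j] for Int indices; only used under '0 ≤ i' / '0 ≤ j' guards
def pvGetI (M : List (List Int)) (i j : Int) : Int := pvGet M i.toNat j.toNat

-- Source B's while loop in 'arm': count steps from (i, j) in direction (di, dj) while in bounds and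
-- equal to the centre value c; 'fuel' bounds the iteration count (any fuel ≥ n suffices: each
-- step changes the row by ±1 and stays within [0, n-1])
def pvArm (M : List (List Int)) (n m : Nat) (c : Int) (i j di dj : Int) : Nat → Int
  | 0 => 0
  | fuel + 1 =>
    if 0 ≤ i + di ∧ i + di ≤ (n : Int) - 1 ∧ 0 ≤ j + dj ∧ j + dj ≤ (m : Int) - 1 ∧
        pvGetI M (i + di) (j + dj) = c
    then 1 + pvArm M n m c (i + di) (j + dj) di dj fuel
    else 0

-- body of Source B's scan for one cell (i, j); state = (max_size, best)
def pvStepScanB (sz : Nat → Nat → Int) (i : Nat)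
    (s : Int × List Int) (j : Nat) : Int × List Int :=
  let size := sz i j
  if size > s.1 then (size, [(i : Int), (j : Int)]) else s

def pvRowScanB (sz : Nat → Nat → Int) (m : Nat)
    (s : Int × List Int) (i : Nat) : Int × List Int :=
  (List.range m).foldl (pvStepScanB sz i) s

def solution_alt (matrix : List (List Int)) : List Int :=
  let n := matrix.length
  let m := (matrix.headD []).length
  if m = 0 then [-1, -1]
  else
    let sz := fun (i j : Nat) =>
      let c := pvGet matrix i j
      min (min (min (pvArm matrix n m c i j (-1) (-1) n) (pvArm matrix n m c i j (-1) 1 n))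
               (pvArm matrix n m c i j 1 (-1) n))
          (pvArm matrix n m c i j 1 1 n)
    let fin := (List.range n).foldl (pvRowScanB sz m) ((0 : Int), [0, 0])
    fin.2

-- ===== PRECONDITION & SPEC =====
-- Pre_ excludes the empty matrix and ragged matrices with some row shorter than the first row:
-- there Python A raises IndexError or, when its guards happen to short-circuit around every
-- read of the short row, B's unconditional read of the centre cell raises IndexError instead.
def Pre_solution (matrix : List (List Int)) : Prop :=
  matrix ≠ [] ∧ ∀ r ∈ matrix, (matrix.headD []).length ≤ r.length

instance (matrix : List (List Int)) : Decidable (Pre_solution matrix) := by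
  unfold Pre_solution; infer_instance

def pvWitness_solution : List (List Int) := [[1, 2], [3, 4]]

def Spec_solution (matrix : List (List Int)) (out : List Int) : Prop := out = solution_alt matrix
instance (matrix : List (List Int)) (out : List Int) : Decidable (Spec_solution matrix out) := by
  unfold Spec_solution; infer_instance

-- ===== CLAIM (what is proved, stated in full; the proofs are below) =====
def Claim_equal_solution : Prop := ∀ (matrix : List (List Int)), Dom_solution matrix → Pre_solution matrix → Spec_solution matrix (solution matrix)

-- ===== LEMMAS AND PROOFS =====

-- the arm lengths A's four tables hold after the fill loops, as direct recursions
def armTL (M : List (List Int)) (i j : Nat) : Int :=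
  if h : 0 < i ∧ 0 < j ∧ pvGet M i j = pvGet M (i-1) (j-1)
  then 1 + armTL M (i-1) (j-1) else 0
termination_by i
decreasing_by omega

def armTR (M : List (List Int)) (m : Nat) (i j : Nat) : Int :=
  if h : 0 < i ∧ j < m - 1 ∧ pvGet M i j = pvGet M (i-1) (j+1)
  then 1 + armTR M m (i-1) (j+1) else 0
termination_by i
decreasing_by omega

def armBL (M : List (List Int)) (n : Nat) (i j : Nat) : Int :=
  if h : i < n - 1 ∧ 0 < j ∧ pvGet M i j = pvGet M (i+1) (j-1)
  then 1 + armBL M n (i+1) (j-1) else 0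
termination_by n - i
decreasing_by omega

def armBR (M : List (List Int)) (n m : Nat) (i j : Nat) : Int :=
  if h : i < n - 1 ∧ j < m - 1 ∧ pvGet M i j = pvGet M (i+1) (j+1)
  then 1 + armBR M n m (i+1) (j+1) else 0
termination_by n - i
decreasing_by omega

theorem stepTop_fst (M : List (List Int)) (m i : Nat)
    (q : (Nat → Nat → Int) × (Nat → Nat → Int)) (j : Nat) :
    (pvStepTop M m i q j).1 =
      if 0 < i ∧ 0 < j ∧ pvGet M i j = pvGet M (i-1) (j-1)
      then pvUpd q.1 i j (1 + q.1 (i-1) (j-1)) else q.1 := by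
  unfold pvStepTop; split_ifs <;> rfl

theorem stepTop_snd (M : List (List Int)) (m i : Nat)
    (q : (Nat → Nat → Int) × (Nat → Nat → Int)) (j : Nat) :
    (pvStepTop M m i q j).2 =
      if 0 < i ∧ j < m - 1 ∧ pvGet M i j = pvGet M (i-1) (j+1)
      then pvUpd q.2 i j (1 + q.2 (i-1) (j+1)) else q.2 := by
  unfold pvStepTop; split_ifs <;> rfl

theorem stepBot_fst (M : List (List Int)) (n m i : Nat)
    (q : (Nat → Nat → Int) × (Nat → Nat → Int)) (j : Nat) :
    (pvStepBot M n m i q j).1 =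
      if i < n - 1 ∧ 0 < j ∧ pvGet M i j = pvGet M (i+1) (j-1)
      then pvUpd q.1 i j (1 + q.1 (i+1) (j-1)) else q.1 := by
  unfold pvStepBot; split_ifs <;> rfl

theorem stepBot_snd (M : List (List Int)) (n m i : Nat)
    (q : (Nat → Nat → Int) × (Nat → Nat → Int)) (j : Nat) :
    (pvStepBot M n m i q j).2 =
      if i < n - 1 ∧ j < m - 1 ∧ pvGet M i j = pvGet M (i+1) (j+1)
      then pvUpd q.2 i j (1 + q.2 (i+1) (j+1)) else q.2 := by
  unfold pvStepBot; split_ifs <;> rfl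

-- the inner fill loop of the first pass: completes row i, leaves other rows alone
theorem inner_top (M : List (List Int)) (m i : Nat) :
    ∀ (js : List Nat) (t : (Nat → Nat → Int) × (Nat → Nat → Int)),
    js.Pairwise (· < ·) → (∀ j ∈ js, j < m) →
    (∀ a b, a < i → b < m → t.1 a b = armTL M a b ∧ t.2 a b = armTR M m a b) →
    (∀ j ∈ js, t.1 i j = 0 ∧ t.2 i j = 0) →
    (∀ a b, a ≠ i → (js.foldl (pvStepTop M m i) t).1 a b = t.1 a b ∧
        (js.foldl (pvStepTop M m i) t).2 a b = t.2 a b) ∧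
    (∀ j ∈ js, (js.foldl (pvStepTop M m i) t).1 i j = armTL M i j ∧
        (js.foldl (pvStepTop M m i) t).2 i j = armTR M m i j) ∧
    (∀ j, j ∉ js → (js.foldl (pvStepTop M m i) t).1 i j = t.1 i j ∧
        (js.foldl (pvStepTop M m i) t).2 i j = t.2 i j) := by
  intro js
  induction js with
  | nil => intro t _ _ _ _; refine ⟨fun a b _ => ⟨rfl, rfl⟩, fun j hj => absurd hj (List.not_mem_nil), fun j _ => ⟨rfl, rfl⟩⟩
  | cons j js ih =>
    intro t hpw hmem hrows hzero
    have hpw' := (List.pairwise_cons.mp hpw)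
    have hjm : j < m := hmem j List.mem_cons_self
    set t1 := pvStepTop M m i t j with ht1
    -- pointwise description of t1
    have f1 : ∀ a b, ¬(a = i ∧ b = j) → t1.1 a b = t.1 a b ∧ t1.2 a b = t.2 a b := by
      intro a b hab
      constructor
      · rw [ht1, stepTop_fst]; split_ifs with h
        · simp [pvUpd, hab]
        · rfl
      · rw [ht1, stepTop_snd]; split_ifs with h
        · simp [pvUpd, hab]
        · rfl
    have f2 : t1.1 i j = armTL M i j ∧ t1.2 i j = armTR M m i j := by
      constructor
      · rw [ht1, stepTop_fst]
        by_cases h : 0 < i ∧ 0 < j ∧ pvGet M i j = pvGet M (i-1) (j-1)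
        · rw [if_pos h]
          have := (hrows (i-1) (j-1) (by omega) (by omega)).1
          rw [armTL]; rw [dif_pos h]; simp [pvUpd, this]
        · rw [if_neg h, (hzero j List.mem_cons_self).1, armTL, dif_neg h]
      · rw [ht1, stepTop_snd]
        by_cases h : 0 < i ∧ j < m - 1 ∧ pvGet M i j = pvGet M (i-1) (j+1)
        · rw [if_pos h]
          have := (hrows (i-1) (j+1) (by omega) (by omega)).2
          rw [armTR]; rw [dif_pos h]; simp [pvUpd, this]
        · rw [if_neg h, (hzero j List.mem_cons_self).2, armTR, dif_neg h]
    have ihs := ih t1 hpw'.2 (fun j' hj' => hmem j' (List.mem_cons_of_mem _ hj'))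
      (fun a b ha hb => by
        have := f1 a b (by rintro ⟨h1, _⟩; omega)
        exact ⟨this.1.trans (hrows a b ha hb).1, this.2.trans (hrows a b ha hb).2⟩)
      (fun j' hj' => by
        have hne : j ≠ j' := by have := hpw'.1 j' hj'; omega
        have := f1 i j' (by rintro ⟨_, h2⟩; exact hne h2.symm)
        exact ⟨this.1.trans (hzero j' (List.mem_cons_of_mem _ hj')).1,
               this.2.trans (hzero j' (List.mem_cons_of_mem _ hj')).2⟩)
    have hfold : (j :: js).foldl (pvStepTop M m i) t = js.foldl (pvStepTop M m i) t1 := rfl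
    rw [hfold]
    refine ⟨?_, ?_, ?_⟩
    · intro a b ha
      have h1 := ihs.1 a b ha
      have h2 := f1 a b (by rintro ⟨h1', _⟩; exact ha h1')
      exact ⟨h1.1.trans h2.1, h1.2.trans h2.2⟩
    · intro j' hj'
      rcases List.mem_cons.mp hj' with h | h
      · subst h
        have hnotin : j' ∉ js := fun hin => by have := hpw'.1 j' hin; omega
        have h3 := ihs.2.2 j' hnotin
        exact ⟨h3.1.trans f2.1, h3.2.trans f2.2⟩
      · exact ihs.2.1 j' h
    · intro j' hj'
      have hne : j' ≠ j := fun he => hj' (he ▸ List.mem_cons_self)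
      have h3 := ihs.2.2 j' (fun hin => hj' (List.mem_cons_of_mem _ hin))
      have h4 := f1 i j' (by rintro ⟨_, h2⟩; exact hne h2)
      exact ⟨h3.1.trans h4.1, h3.2.trans h4.2⟩

-- the inner fill loop of the second pass: completes row i given all rows above i (> i) done
theorem inner_bot (M : List (List Int)) (n m i : Nat) :
    ∀ (js : List Nat) (t : (Nat → Nat → Int) × (Nat → Nat → Int)),
    js.Pairwise (· < ·) → (∀ j ∈ js, j < m) →
    (∀ a b, i < a → a < n → b < m → t.1 a b = armBL M n a b ∧ t.2 a b = armBR M n m a b) →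
    (∀ j ∈ js, t.1 i j = 0 ∧ t.2 i j = 0) →
    (∀ a b, a ≠ i → (js.foldl (pvStepBot M n m i) t).1 a b = t.1 a b ∧
        (js.foldl (pvStepBot M n m i) t).2 a b = t.2 a b) ∧
    (∀ j ∈ js, (js.foldl (pvStepBot M n m i) t).1 i j = armBL M n i j ∧
        (js.foldl (pvStepBot M n m i) t).2 i j = armBR M n m i j) ∧
    (∀ j, j ∉ js → (js.foldl (pvStepBot M n m i) t).1 i j = t.1 i j ∧
        (js.foldl (pvStepBot M n m i) t).2 i j = t.2 i j) := by
  intro js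
  induction js with
  | nil => intro t _ _ _ _; refine ⟨fun a b _ => ⟨rfl, rfl⟩, fun j hj => absurd hj (List.not_mem_nil), fun j _ => ⟨rfl, rfl⟩⟩
  | cons j js ih =>
    intro t hpw hmem hrows hzero
    have hpw' := (List.pairwise_cons.mp hpw)
    have hjm : j < m := hmem j List.mem_cons_self
    set t1 := pvStepBot M n m i t j with ht1
    have f1 : ∀ a b, ¬(a = i ∧ b = j) → t1.1 a b = t.1 a b ∧ t1.2 a b = t.2 a b := by
      intro a b hab
      constructor
      · rw [ht1, stepBot_fst]; split_ifs with h
        · simp [pvUpd, hab]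
        · rfl
      · rw [ht1, stepBot_snd]; split_ifs with h
        · simp [pvUpd, hab]
        · rfl
    have f2 : t1.1 i j = armBL M n i j ∧ t1.2 i j = armBR M n m i j := by
      constructor
      · rw [ht1, stepBot_fst]
        by_cases h : i < n - 1 ∧ 0 < j ∧ pvGet M i j = pvGet M (i+1) (j-1)
        · rw [if_pos h]
          have := (hrows (i+1) (j-1) (by omega) (by omega) (by omega)).1
          rw [armBL]; rw [dif_pos h]; simp [pvUpd, this]
        · rw [if_neg h, (hzero j List.mem_cons_self).1, armBL, dif_neg h]
      · rw [ht1, stepBot_snd]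
        by_cases h : i < n - 1 ∧ j < m - 1 ∧ pvGet M i j = pvGet M (i+1) (j+1)
        · rw [if_pos h]
          have := (hrows (i+1) (j+1) (by omega) (by omega) (by omega)).2
          rw [armBR]; rw [dif_pos h]; simp [pvUpd, this]
        · rw [if_neg h, (hzero j List.mem_cons_self).2, armBR, dif_neg h]
    have ihs := ih t1 hpw'.2 (fun j' hj' => hmem j' (List.mem_cons_of_mem _ hj'))
      (fun a b ha han hb => by
        have := f1 a b (by rintro ⟨h1, _⟩; omega)
        exact ⟨this.1.trans (hrows a b ha han hb).1, this.2.trans (hrows a b ha han hb).2⟩)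
      (fun j' hj' => by
        have hne : j ≠ j' := by have := hpw'.1 j' hj'; omega
        have := f1 i j' (by rintro ⟨_, h2⟩; exact hne h2.symm)
        exact ⟨this.1.trans (hzero j' (List.mem_cons_of_mem _ hj')).1,
               this.2.trans (hzero j' (List.mem_cons_of_mem _ hj')).2⟩)
    have hfold : (j :: js).foldl (pvStepBot M n m i) t = js.foldl (pvStepBot M n m i) t1 := rfl
    rw [hfold]
    refine ⟨?_, ?_, ?_⟩
    · intro a b ha
      have h1 := ihs.1 a b ha
      have h2 := f1 a b (by rintro ⟨h1', _⟩; exact ha h1')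
      exact ⟨h1.1.trans h2.1, h1.2.trans h2.2⟩
    · intro j' hj'
      rcases List.mem_cons.mp hj' with h | h
      · subst h
        have hnotin : j' ∉ js := fun hin => by have := hpw'.1 j' hin; omega
        have h3 := ihs.2.2 j' hnotin
        exact ⟨h3.1.trans f2.1, h3.2.trans f2.2⟩
      · exact ihs.2.1 j' h
    · intro j' hj'
      have hne : j' ≠ j := fun he => hj' (he ▸ List.mem_cons_self)
      have h3 := ihs.2.2 j' (fun hin => hj' (List.mem_cons_of_mem _ hin))
      have h4 := f1 i j' (by rintro ⟨_, h2⟩; exact hne h2)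
      exact ⟨h3.1.trans h4.1, h3.2.trans h4.2⟩

-- first fill pass, rows 0..k-1
theorem fill_top (M : List (List Int)) (m : Nat) : ∀ (k : Nat),
    (∀ a b, a < k → b < m →
      ((List.range k).foldl (pvRowTop M m) (fun _ _ => 0, fun _ _ => 0)).1 a b = armTL M a b ∧
      ((List.range k).foldl (pvRowTop M m) (fun _ _ => 0, fun _ _ => 0)).2 a b = armTR M m a b) ∧
    (∀ a b, k ≤ a →
      ((List.range k).foldl (pvRowTop M m) (fun _ _ => 0, fun _ _ => 0)).1 a b = 0 ∧
      ((List.range k).foldl (pvRowTop M m) (fun _ _ => 0, fun _ _ => 0)).2 a b = 0) := by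
  intro k
  induction k with
  | zero => exact ⟨fun a b ha _ => by omega, fun a b _ => ⟨rfl, rfl⟩⟩
  | succ k ih =>
    rw [List.range_succ, List.foldl_append]
    set T := (List.range k).foldl (pvRowTop M m) (fun _ _ => 0, fun _ _ => 0) with hT
    have hrun := inner_top M m k (List.range m) T (List.pairwise_lt_range)
      (fun j hj => List.mem_range.mp hj)
      (fun a b ha hb => ih.1 a b ha hb)
      (fun j _ => ih.2 k j le_rfl)
    have hfold : [k].foldl (pvRowTop M m) T = (List.range m).foldl (pvStepTop M m k) T := rfl
    rw [hfold]
    constructor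
    · intro a b ha hb
      by_cases hak : a = k
      · subst hak; exact hrun.2.1 b (List.mem_range.mpr hb)
      · have h1 := hrun.1 a b hak
        have h2 := ih.1 a b (by omega) hb
        exact ⟨h1.1.trans h2.1, h1.2.trans h2.2⟩
    · intro a b ha
      have h1 := hrun.1 a b (by omega)
      have h2 := ih.2 a b (by omega)
      exact ⟨h1.1.trans h2.1, h1.2.trans h2.2⟩

-- second fill pass, rows n-1 down to n-k
theorem fill_bot (M : List (List Int)) (n m : Nat) : ∀ (k : Nat), k ≤ n →
    (∀ a b, n - k ≤ a → a < n → b < m →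
      (((List.range' (n-k) k).reverse).foldl (pvRowBot M n m) (fun _ _ => 0, fun _ _ => 0)).1 a b = armBL M n a b ∧
      (((List.range' (n-k) k).reverse).foldl (pvRowBot M n m) (fun _ _ => 0, fun _ _ => 0)).2 a b = armBR M n m a b) ∧
    (∀ a b, a < n - k →
      (((List.range' (n-k) k).reverse).foldl (pvRowBot M n m) (fun _ _ => 0, fun _ _ => 0)).1 a b = 0 ∧
      (((List.range' (n-k) k).reverse).foldl (pvRowBot M n m) (fun _ _ => 0, fun _ _ => 0)).2 a b = 0) := by
  intro k
  induction k with
  | zero => exact fun _ => ⟨fun a b ha han hb => by omega, fun a b _ => ⟨rfl, rfl⟩⟩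
  | succ k ih =>
    intro hkn
    have ihk := ih (by omega)
    have hsplit : List.range' (n - (k+1)) (k+1) = (n-k-1) :: List.range' (n-k) k := by
      have h1 : n - (k+1) = n - k - 1 := by omega
      have h2 : (n - k - 1) + 1 = n - k := by omega
      rw [h1, List.range'_succ, h2]
    rw [hsplit, List.reverse_cons, List.foldl_append]
    set T := ((List.range' (n-k) k).reverse).foldl (pvRowBot M n m) (fun _ _ => 0, fun _ _ => 0) with hT
    have hrun := inner_bot M n m (n-k-1) (List.range m) T (List.pairwise_lt_range)
      (fun j hj => List.mem_range.mp hj)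
      (fun a b ha han hb => ihk.1 a b (by omega) han hb)
      (fun j _ => ihk.2 (n-k-1) j (by omega))
    have hfold : [n-k-1].foldl (pvRowBot M n m) T = (List.range m).foldl (pvStepBot M n m (n-k-1)) T := rfl
    rw [hfold]
    constructor
    · intro a b ha han hb
      by_cases hak : a = n-k-1
      · subst hak; exact hrun.2.1 b (List.mem_range.mpr hb)
      · have h1 := hrun.1 a b hak
        have h2 := ihk.1 a b (by omega) han hb
        exact ⟨h1.1.trans h2.1, h1.2.trans h2.2⟩
    · intro a b ha
      have h1 := hrun.1 a b (by omega)
      have h2 := ihk.2 a b (by omega)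
      exact ⟨h1.1.trans h2.1, h1.2.trans h2.2⟩

theorem pvArm_nonneg (M : List (List Int)) (n m : Nat) (c : Int) (di dj : Int) :
    ∀ (fuel : Nat) (i j : Int), 0 ≤ pvArm M n m c i j di dj fuel := by
  intro fuel
  induction fuel with
  | zero => intro i j; simp [pvArm]
  | succ fuel ih =>
    intro i j
    rw [pvArm]
    split_ifs with h
    · have := ih (i + di) (j + dj); omega
    · exact le_rfl

-- Source B's expansion equals A's arm recursion, direction (-1, -1)
theorem pvArm_TL (M : List (List Int)) (n m : Nat) :
    ∀ (fuel : Nat) (i j : Nat) (c : Int), i < n → j < m → i ≤ fuel → c = pvGet M i j →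
    pvArm M n m c (i : Int) (j : Int) (-1) (-1) fuel = armTL M i j := by
  intro fuel
  induction fuel with
  | zero =>
    intro i j c hin hjm hif hc
    have hi0 : i = 0 := by omega
    subst hi0
    rw [armTL, dif_neg (by omega)]; rfl
  | succ fuel ih =>
    intro i j c hin hjm hif hc
    rw [pvArm]
    by_cases h : 0 < i ∧ 0 < j ∧ pvGet M i j = pvGet M (i-1) (j-1)
    · have hget : pvGetI M ((i:Int) + -1) ((j:Int) + -1) = pvGet M (i-1) (j-1) := by
        unfold pvGetI pvGet
        have e1 : ((i:Int) + -1).toNat = i - 1 := by omega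
        have e2 : ((j:Int) + -1).toNat = j - 1 := by omega
        rw [e1, e2]
      rw [if_pos ⟨by omega, by omega, by omega, by omega, by rw [hget, ← h.2.2, ← hc]⟩]
      have e1 : (i:Int) + -1 = ((i-1 : Nat) : Int) := by omega
      have e2 : (j:Int) + -1 = ((j-1 : Nat) : Int) := by omega
      rw [e1, e2, ih (i-1) (j-1) c (by omega) (by omega) (by omega) (by rw [hc, h.2.2])]
      conv_rhs => rw [armTL]
      rw [dif_pos h]
    · rw [armTL, dif_neg h, if_neg ?_]
      rintro ⟨h1, h2, h3, h4, h5⟩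
      apply h
      have hi : 0 < i := by omega
      have hj : 0 < j := by omega
      refine ⟨hi, hj, ?_⟩
      have hget : pvGetI M ((i:Int) + -1) ((j:Int) + -1) = pvGet M (i-1) (j-1) := by
        unfold pvGetI pvGet
        have e1 : ((i:Int) + -1).toNat = i - 1 := by omega
        have e2 : ((j:Int) + -1).toNat = j - 1 := by omega
        rw [e1, e2]
      rw [← hc, ← h5]; exact hget

-- direction (-1, +1)
theorem pvArm_TR (M : List (List Int)) (n m : Nat) :
    ∀ (fuel : Nat) (i j : Nat) (c : Int), i < n → j < m → i ≤ fuel → c = pvGet M i j →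
    pvArm M n m c (i : Int) (j : Int) (-1) 1 fuel = armTR M m i j := by
  intro fuel
  induction fuel with
  | zero =>
    intro i j c hin hjm hif hc
    have hi0 : i = 0 := by omega
    subst hi0
    rw [armTR, dif_neg (by omega)]; rfl
  | succ fuel ih =>
    intro i j c hin hjm hif hc
    rw [pvArm]
    by_cases h : 0 < i ∧ j < m - 1 ∧ pvGet M i j = pvGet M (i-1) (j+1)
    · have hget : pvGetI M ((i:Int) + -1) ((j:Int) + 1) = pvGet M (i-1) (j+1) := by
        unfold pvGetI pvGet
        have e1 : ((i:Int) + -1).toNat = i - 1 := by omega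
        have e2 : ((j:Int) + 1).toNat = j + 1 := by omega
        rw [e1, e2]
      rw [if_pos ⟨by omega, by omega, by omega, by omega, by rw [hget, ← h.2.2, ← hc]⟩]
      have e1 : (i:Int) + -1 = ((i-1 : Nat) : Int) := by omega
      have e2 : (j:Int) + 1 = ((j+1 : Nat) : Int) := by omega
      rw [e1, e2, ih (i-1) (j+1) c (by omega) (by omega) (by omega) (by rw [hc, h.2.2])]
      conv_rhs => rw [armTR]
      rw [dif_pos h]
    · rw [armTR, dif_neg h, if_neg ?_]
      rintro ⟨h1, h2, h3, h4, h5⟩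
      apply h
      refine ⟨by omega, by omega, ?_⟩
      have hget : pvGetI M ((i:Int) + -1) ((j:Int) + 1) = pvGet M (i-1) (j+1) := by
        unfold pvGetI pvGet
        have e1 : ((i:Int) + -1).toNat = i - 1 := by omega
        have e2 : ((j:Int) + 1).toNat = j + 1 := by omega
        rw [e1, e2]
      rw [← hc, ← h5]; exact hget

-- direction (+1, -1)
theorem pvArm_BL (M : List (List Int)) (n m : Nat) :
    ∀ (fuel : Nat) (i j : Nat) (c : Int), i < n → j < m → n ≤ fuel + i + 1 → c = pvGet M i j →
    pvArm M n m c (i : Int) (j : Int) 1 (-1) fuel = armBL M n i j := by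
  intro fuel
  induction fuel with
  | zero =>
    intro i j c hin hjm hif hc
    rw [armBL, dif_neg (by omega)]; rfl
  | succ fuel ih =>
    intro i j c hin hjm hif hc
    rw [pvArm]
    by_cases h : i < n - 1 ∧ 0 < j ∧ pvGet M i j = pvGet M (i+1) (j-1)
    · have hget : pvGetI M ((i:Int) + 1) ((j:Int) + -1) = pvGet M (i+1) (j-1) := by
        unfold pvGetI pvGet
        have e1 : ((i:Int) + 1).toNat = i + 1 := by omega
        have e2 : ((j:Int) + -1).toNat = j - 1 := by omega
        rw [e1, e2]
      rw [if_pos ⟨by omega, by omega, by omega, by omega, by rw [hget, ← h.2.2, ← hc]⟩]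
      have e1 : (i:Int) + 1 = ((i+1 : Nat) : Int) := by omega
      have e2 : (j:Int) + -1 = ((j-1 : Nat) : Int) := by omega
      rw [e1, e2, ih (i+1) (j-1) c (by omega) (by omega) (by omega) (by rw [hc, h.2.2])]
      conv_rhs => rw [armBL]
      rw [dif_pos h]
    · rw [armBL, dif_neg h, if_neg ?_]
      rintro ⟨h1, h2, h3, h4, h5⟩
      apply h
      refine ⟨by omega, by omega, ?_⟩
      have hget : pvGetI M ((i:Int) + 1) ((j:Int) + -1) = pvGet M (i+1) (j-1) := by
        unfold pvGetI pvGet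
        have e1 : ((i:Int) + 1).toNat = i + 1 := by omega
        have e2 : ((j:Int) + -1).toNat = j - 1 := by omega
        rw [e1, e2]
      rw [← hc, ← h5]; exact hget

-- direction (+1, +1)
theorem pvArm_BR (M : List (List Int)) (n m : Nat) :
    ∀ (fuel : Nat) (i j : Nat) (c : Int), i < n → j < m → n ≤ fuel + i + 1 → c = pvGet M i j →
    pvArm M n m c (i : Int) (j : Int) 1 1 fuel = armBR M n m i j := by
  intro fuel
  induction fuel with
  | zero =>
    intro i j c hin hjm hif hc
    rw [armBR, dif_neg (by omega)]; rfl
  | succ fuel ih =>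
    intro i j c hin hjm hif hc
    rw [pvArm]
    by_cases h : i < n - 1 ∧ j < m - 1 ∧ pvGet M i j = pvGet M (i+1) (j+1)
    · have hget : pvGetI M ((i:Int) + 1) ((j:Int) + 1) = pvGet M (i+1) (j+1) := by
        unfold pvGetI pvGet
        have e1 : ((i:Int) + 1).toNat = i + 1 := by omega
        have e2 : ((j:Int) + 1).toNat = j + 1 := by omega
        rw [e1, e2]
      rw [if_pos ⟨by omega, by omega, by omega, by omega, by rw [hget, ← h.2.2, ← hc]⟩]
      have e1 : (i:Int) + 1 = ((i+1 : Nat) : Int) := by omega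
      have e2 : (j:Int) + 1 = ((j+1 : Nat) : Int) := by omega
      rw [e1, e2, ih (i+1) (j+1) c (by omega) (by omega) (by omega) (by rw [hc, h.2.2])]
      conv_rhs => rw [armBR]
      rw [dif_pos h]
    · rw [armBR, dif_neg h, if_neg ?_]
      rintro ⟨h1, h2, h3, h4, h5⟩
      apply h
      refine ⟨by omega, by omega, ?_⟩
      have hget : pvGetI M ((i:Int) + 1) ((j:Int) + 1) = pvGet M (i+1) (j+1) := by
        unfold pvGetI pvGet
        have e1 : ((i:Int) + 1).toNat = i + 1 := by omega
        have e2 : ((j:Int) + 1).toNat = j + 1 := by omega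
        rw [e1, e2]
      rw [← hc, ← h5]; exact hget

-- evaluating one scan step of A on a concrete best-centre state
theorem stepScanA_some (sz : Nat → Nat → Int) (i : Nat) (ms : Int) (b0 b1 : Int) (j : Nat) :
    pvStepScanA sz i (ms, some [b0, b1]) j =
      if sz i j > ms then (sz i j, some [(i : Int), (j : Int)])
      else if sz i j = ms then
        (if (i : Int) < b0 ∨ ((i : Int) = b0 ∧ (j : Int) < b1)
         then (ms, some [(i : Int), (j : Int)]) else (ms, some [b0, b1]))
      else (ms, some [b0, b1]) := by
  unfold pvStepScanA
  dsimp only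
  have e0 : ([b0, b1] : List Int).getD 0 0 = b0 := rfl
  have e1 : ([b0, b1] : List Int).getD 1 0 = b1 := rfl
  rw [e0, e1]

theorem stepScanB_eq (sz : Nat → Nat → Int) (i : Nat) (ms : Int) (bl : List Int) (j : Nat) :
    pvStepScanB sz i (ms, bl) j =
      if sz i j > ms then (sz i j, [(i : Int), (j : Int)]) else (ms, bl) := rfl

-- one row of the two scans, from related states; after the first cell, A's elif never fires
theorem scan_inner (sz : Nat → Nat → Int) (i : Nat) :
    ∀ (js : List Nat), js.Pairwise (· < ·) →
    ∀ (ms : Int) (i0 j0 : Nat), (i0 < i ∨ (i0 = i ∧ ∀ j ∈ js, j0 ≤ j)) →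
    ∃ (ms' : Int) (i0' j0' : Nat),
      js.foldl (pvStepScanA sz i) (ms, some [(i0 : Int), (j0 : Int)]) = (ms', some [(i0' : Int), (j0' : Int)]) ∧
      js.foldl (pvStepScanB sz i) (ms, [(i0 : Int), (j0 : Int)]) = (ms', [(i0' : Int), (j0' : Int)]) ∧
      i0' ≤ i := by
  intro js
  induction js with
  | nil =>
    intro _ ms i0 j0 hle
    exact ⟨ms, i0, j0, rfl, rfl, by omega⟩
  | cons j js ih =>
    intro hpw ms i0 j0 hle
    have hpw' := List.pairwise_cons.mp hpw
    have hord : i0 < i ∨ (i0 = i ∧ j0 ≤ j) := by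
      rcases hle with h | ⟨h1, h2⟩
      · exact Or.inl h
      · exact Or.inr ⟨h1, h2 j List.mem_cons_self⟩
    by_cases hgt : sz i j > ms
    · have hA : pvStepScanA sz i (ms, some [(i0 : Int), (j0 : Int)]) j = (sz i j, some [(i : Int), (j : Int)]) := by
        rw [stepScanA_some, if_pos hgt]
      have hB : pvStepScanB sz i (ms, [(i0 : Int), (j0 : Int)]) j = (sz i j, [(i : Int), (j : Int)]) := by
        rw [stepScanB_eq, if_pos hgt]
      have := ih hpw'.2 (sz i j) i j (Or.inr ⟨rfl, fun j' hj' => le_of_lt (hpw'.1 j' hj')⟩)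
      simpa [List.foldl_cons, hA, hB] using this
    · have hkeep : ¬((i : Int) < (i0 : Int) ∨ ((i : Int) = (i0 : Int) ∧ (j : Int) < (j0 : Int))) := by
        rcases hord with h | ⟨h1, h2⟩ <;> omega
      have hA : pvStepScanA sz i (ms, some [(i0 : Int), (j0 : Int)]) j = (ms, some [(i0 : Int), (j0 : Int)]) := by
        rw [stepScanA_some, if_neg hgt]
        by_cases heq : sz i j = ms
        · rw [if_pos heq, if_neg hkeep]
        · rw [if_neg heq]
      have hB : pvStepScanB sz i (ms, [(i0 : Int), (j0 : Int)]) j = (ms, [(i0 : Int), (j0 : Int)]) := by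
        rw [stepScanB_eq, if_neg hgt]
      have hle' : i0 < i ∨ (i0 = i ∧ ∀ j' ∈ js, j0 ≤ j') := by
        rcases hle with h | ⟨h1, h2⟩
        · exact Or.inl h
        · exact Or.inr ⟨h1, fun j' hj' => h2 j' (List.mem_cons_of_mem _ hj')⟩
      have := ih hpw'.2 ms i0 j0 hle'
      simpa [List.foldl_cons, hA, hB] using this

-- the remaining rows of the two scans
theorem scan_outer (sz : Nat → Nat → Int) (m : Nat) :
    ∀ (is : List Nat), is.Pairwise (· < ·) →
    ∀ (ms : Int) (i0 j0 : Nat), (∀ i ∈ is, i0 < i) →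
    ∃ (ms' : Int) (i0' j0' : Nat),
      is.foldl (pvRowScanA sz m) (ms, some [(i0 : Int), (j0 : Int)]) = (ms', some [(i0' : Int), (j0' : Int)]) ∧
      is.foldl (pvRowScanB sz m) (ms, [(i0 : Int), (j0 : Int)]) = (ms', [(i0' : Int), (j0' : Int)]) := by
  intro is
  induction is with
  | nil => intro _ ms i0 j0 _; exact ⟨ms, i0, j0, rfl, rfl⟩
  | cons i is ih =>
    intro hpw ms i0 j0 hlt
    have hpw' := List.pairwise_cons.mp hpw
    obtain ⟨ms1, i1, j1, hA1, hB1, hi1⟩ :=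
      scan_inner sz i (List.range m) List.pairwise_lt_range ms i0 j0
        (Or.inl (hlt i List.mem_cons_self))
    obtain ⟨ms', i0', j0', hA2, hB2⟩ := ih hpw'.2 ms1 i1 j1
      (fun i' hi' => lt_of_le_of_lt hi1 (hpw'.1 i' hi'))
    refine ⟨ms', i0', j0', ?_, ?_⟩
    · rw [List.foldl_cons]
      show is.foldl (pvRowScanA sz m) ((List.range m).foldl (pvStepScanA sz i) (ms, some [(i0 : Int), (j0 : Int)])) = _
      rw [hA1]; exact hA2
    · rw [List.foldl_cons]
      show is.foldl (pvRowScanB sz m) ((List.range m).foldl (pvStepScanB sz i) (ms, [(i0 : Int), (j0 : Int)])) = _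
      rw [hB1]; exact hB2

-- the two whole scans agree (n, m > 0; size of the first cell nonnegative)
theorem scans_eq (sz : Nat → Nat → Int) (n m : Nat) (hn : 0 < n) (hm : 0 < m)
    (hnn : 0 ≤ sz 0 0) :
    ((List.range n).foldl (pvRowScanA sz m) ((0 : Int), none)).2 =
      some (((List.range n).foldl (pvRowScanB sz m) ((0 : Int), [0, 0])).2) := by
  obtain ⟨n', rfl⟩ : ∃ n', n = n' + 1 := ⟨n - 1, by omega⟩
  obtain ⟨m', rfl⟩ : ∃ m', m = m' + 1 := ⟨m - 1, by omega⟩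
  rw [List.range_succ_eq_map]
  -- first cell (0,0): A leaves None behind, B keeps its initial [0,0]
  have hfirst : ∃ ms1 : Int, pvStepScanA sz 0 ((0 : Int), none) 0 = (ms1, some [((0:Nat) : Int), ((0:Nat) : Int)]) ∧
      pvStepScanB sz 0 ((0 : Int), [0, 0]) 0 = (ms1, [((0:Nat) : Int), ((0:Nat) : Int)]) := by
    by_cases hgt : sz 0 0 > 0
    · exact ⟨sz 0 0, by simp [pvStepScanA, hgt], by simp [pvStepScanB, hgt]⟩
    · have heq : sz 0 0 = 0 := le_antisymm (by omega) hnn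
      exact ⟨0, by simp [pvStepScanA, heq], by simp [pvStepScanB, hgt]⟩
  obtain ⟨ms1, hA0, hB0⟩ := hfirst
  have hpwm : ((List.range m').map Nat.succ).Pairwise (· < ·) :=
    List.pairwise_lt_range.map _ (fun _ _ h => Nat.succ_lt_succ h)
  have hpwn : ((List.range n').map Nat.succ).Pairwise (· < ·) :=
    List.pairwise_lt_range.map _ (fun _ _ h => Nat.succ_lt_succ h)
  obtain ⟨ms2, i1, j1, hA1, hB1, hi1⟩ :=
    scan_inner sz 0 ((List.range m').map Nat.succ) hpwm ms1 0 0
      (Or.inr ⟨rfl, fun j _ => Nat.zero_le j⟩)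
  obtain ⟨ms', i0', j0', hA2, hB2⟩ :=
    scan_outer sz (m' + 1) ((List.range n').map Nat.succ) hpwn ms2 i1 j1
      (fun i hi => by
        obtain ⟨i'', _, rfl⟩ := List.mem_map.mp hi
        omega)
  have hrowA : pvRowScanA sz (m' + 1) ((0 : Int), none) 0 = (ms2, some [(i1 : Int), (j1 : Int)]) := by
    unfold pvRowScanA
    rw [List.range_succ_eq_map, List.foldl_cons, hA0]
    exact hA1
  have hrowB : pvRowScanB sz (m' + 1) ((0 : Int), [0, 0]) 0 = (ms2, [(i1 : Int), (j1 : Int)]) := by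
    unfold pvRowScanB
    rw [List.range_succ_eq_map, List.foldl_cons, hB0]
    exact hB1
  rw [List.foldl_cons, List.foldl_cons, hrowA, hrowB, hA2, hB2]

-- a fold whose step ignores the state-update is the identity (used when m = 0)
theorem foldl_id {α β : Type} (f : α → β → α) (h : ∀ s x, f s x = s) :
    ∀ (l : List β) (s : α), l.foldl f s = s := by
  intro l
  induction l with
  | nil => intro s; rfl
  | cons x l ih => intro s; rw [List.foldl_cons, h]; exact ih s

theorem foldl_congr_mem {α β : Type} {f g : α → β → α} {l : List β}
    (h : ∀ acc x, x ∈ l → f acc x = g acc x) :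
    ∀ {init : α}, l.foldl f init = l.foldl g init := by
  induction l with
  | nil => intro _; rfl
  | cons x l ih =>
    intro init
    rw [List.foldl_cons, List.foldl_cons, h init x List.mem_cons_self]
    exact ih (fun acc y hy => h acc y (List.mem_cons_of_mem _ hy))

-- replacing the size function pointwise on the scanned rectangle
theorem scanA_congr (sz1 sz2 : Nat → Nat → Int) (n m : Nat)
    (h : ∀ i j, i < n → j < m → sz1 i j = sz2 i j) :
    (List.range n).foldl (pvRowScanA sz1 m) ((0 : Int), none) =
      (List.range n).foldl (pvRowScanA sz2 m) ((0 : Int), none) := by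
  apply foldl_congr_mem
  intro s i hi
  unfold pvRowScanA
  apply foldl_congr_mem
  intro s' j hj
  unfold pvStepScanA
  rw [h i j (List.mem_range.mp hi) (List.mem_range.mp hj)]

-- ===== VERDICT (by name: the statement is the Claim_ definition above) =====
theorem solution_spec : Claim_equal_solution := by
  intro matrix _ _
  unfold Spec_solution
  set n := matrix.length with hn_def
  set m := (matrix.headD []).length with hm_def
  set TT := (List.range n).foldl (pvRowTop matrix m) (fun _ _ => 0, fun _ _ => 0) with hTT
  set BB := ((List.range n).reverse).foldl (pvRowBot matrix n m) (fun _ _ => 0, fun _ _ => 0) with hBB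
  set szA := fun (i j : Nat) => min (min (min (TT.1 i j) (TT.2 i j)) (BB.1 i j)) (BB.2 i j) with hszA
  set szB := fun (i j : Nat) =>
      min (min (min (pvArm matrix n m (pvGet matrix i j) (i : Int) (j : Int) (-1) (-1) n)
                    (pvArm matrix n m (pvGet matrix i j) (i : Int) (j : Int) (-1) 1 n))
               (pvArm matrix n m (pvGet matrix i j) (i : Int) (j : Int) 1 (-1) n))
          (pvArm matrix n m (pvGet matrix i j) (i : Int) (j : Int) 1 1 n) with hszB
  have hsol : solution matrix =
      (match ((List.range n).foldl (pvRowScanA szA m) ((0 : Int), none)).2 with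
       | some b => b
       | none => [-1, -1]) := rfl
  have halt : solution_alt matrix =
      (if m = 0 then [-1, -1]
       else ((List.range n).foldl (pvRowScanB szB m) ((0 : Int), [0, 0])).2) := rfl
  rw [hsol, halt]
  by_cases hm : m = 0
  · rw [if_pos hm]
    have hrow : ∀ (s : Int × Option (List Int)) (i : Nat), pvRowScanA szA m s i = s := by
      intro s i; unfold pvRowScanA; rw [hm]; rfl
    rw [foldl_id _ hrow]
  · rw [if_neg hm]
    have hmpos : 0 < m := Nat.pos_of_ne_zero hm
    have hnpos : 0 < n := by
      rcases matrix with _ | ⟨r, rs⟩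
      · exfalso; exact hm (by simp [hm_def])
      · simp [hn_def]
    -- the four tables equal the four arm recursions on the scanned rectangle
    have htop := fill_top matrix m n
    have hbot := fill_bot matrix n m n le_rfl
    rw [Nat.sub_self, ← List.range_eq_range'] at hbot
    have hsz : ∀ i j, i < n → j < m → szA i j = szB i j := by
      intro i j hi hj
      have h1 : TT.1 i j = armTL matrix i j := (htop.1 i j hi hj).1
      have h2 : TT.2 i j = armTR matrix m i j := (htop.1 i j hi hj).2
      have h3 : BB.1 i j = armBL matrix n i j := (hbot.1 i j (by omega) hi hj).1
      have h4 : BB.2 i j = armBR matrix n m i j := (hbot.1 i j (by omega) hi hj).2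
      have a1 := pvArm_TL matrix n m n i j (pvGet matrix i j) hi hj (by omega) rfl
      have a2 := pvArm_TR matrix n m n i j (pvGet matrix i j) hi hj (by omega) rfl
      have a3 := pvArm_BL matrix n m n i j (pvGet matrix i j) hi hj (by omega) rfl
      have a4 := pvArm_BR matrix n m n i j (pvGet matrix i j) hi hj (by omega) rfl
      rw [hszA, hszB]
      dsimp only
      rw [h1, h2, h3, h4, a1, a2, a3, a4]
    rw [scanA_congr szA szB n m hsz]
    have hnn : 0 ≤ szB 0 0 := by
      rw [hszB]
      dsimp only
      exact le_min (le_min (le_min (pvArm_nonneg _ _ _ _ _ _ _ _ _) (pvArm_nonneg _ _ _ _ _ _ _ _ _))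
        (pvArm_nonneg _ _ _ _ _ _ _ _ _)) (pvArm_nonneg _ _ _ _ _ _ _ _ _)
    rw [scans_eq szB n m hnpos hmpos hnn]
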